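-- pv_equiv track=rewrite | github.com/segorucu/Leetcode | 2838 Maximum Coins Heroes Can Collect/2838maximum-coins-heroes-can-collect.py | maximumCoins
-- ===== SOURCE A (Python) =====
-- from typing import List
--
-- def maximumCoins(heroes: List[int], monsters: List[int], coins: List[int]) -> List[int]:
--
--     arr = []
--     for i, hero in enumerate(heroes):
--         arr.append((hero, i))
--     arr.sort()
--
--     arr2 = []
--     for m, c in zip(monsters, coins):
--         arr2.append((m, c))
--     arr2.sort()
--
--     n = len(heroes)
--     ans = n * [0]
--     l = 0
--     sm = 0
--     m = len(monsters)
--     for hero, i in arr: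
--         while l < m and arr2[l][0] <= hero:
--             sm += arr2[l][1]
--             l += 1
--         ans[i] = sm
--     return ans
-- ===== SOURCE B (Python) =====
-- from typing import List
-- from bisect import bisect_right
--
-- def maximumCoins(heroes: List[int], monsters: List[int], coins: List[int]) -> List[int]:
--     pairs = sorted(zip(monsters, coins))
--     vals = [m for m, _ in pairs]
--     prefix = [0]
--     s = 0
--     for _, c in pairs:
--         s += c
--         prefix.append(s)
--     return [prefix[bisect_right(vals, h)] for h in heroes]
-- ===== Notes on version B (the rewrite author's own statement) =====
-- stated objective: simpler
-- what changed: Replaces A's sort-heroes-and-sweep two-pointer algorithm (which threads a running index and running sum through the heroes in sorted order and scatters results back via saved indices) by a prefix-sum table over the sorted monsters plus one bisect_right lookup per hero, so heroes are never sorted and no sweep state exists. (A also raises IndexError when coins is shorter than monsters and no zipped monster value exceeds all heroes; Pre_ excludes exactly those inputs, where B still returns.)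
import Mathlib
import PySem

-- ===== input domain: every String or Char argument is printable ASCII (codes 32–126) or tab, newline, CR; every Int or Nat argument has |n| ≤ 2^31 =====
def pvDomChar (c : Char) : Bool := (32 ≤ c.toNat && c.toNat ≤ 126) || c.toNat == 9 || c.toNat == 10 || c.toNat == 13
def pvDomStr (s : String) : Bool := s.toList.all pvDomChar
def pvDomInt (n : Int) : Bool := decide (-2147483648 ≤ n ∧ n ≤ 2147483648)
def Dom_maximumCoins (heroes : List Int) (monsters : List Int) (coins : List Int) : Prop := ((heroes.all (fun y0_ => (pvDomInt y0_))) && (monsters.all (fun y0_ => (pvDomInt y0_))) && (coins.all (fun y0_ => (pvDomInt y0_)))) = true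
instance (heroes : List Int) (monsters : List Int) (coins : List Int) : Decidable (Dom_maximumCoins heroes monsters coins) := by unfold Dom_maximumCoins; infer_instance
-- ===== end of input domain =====

-- B replaces A's sort-both-lists two-pointer sweep by a per-hero binary search into a
-- prefix-sum table over the sorted monsters (objective: simpler — no hero sort, no sweep state).

-- ===== PORT A =====
-- the inner `while l < m and arr2[l][0] <= hero` loop; the `none` branch is where
-- Python raises IndexError (such inputs are excluded by Pre_maximumCoins)
def pvWhileA (arr2 : List (Int × Int)) (m : Nat) (hero : Int) (l : Nat) (sm : Int) : Nat × Int :=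
  if _h : l < m then
    match arr2[l]? with
    | some p => if p.1 ≤ hero then pvWhileA arr2 m hero (l + 1) (sm + p.2) else (l, sm)
    | none => (l, sm)
  else (l, sm)
termination_by m - l
decreasing_by omega

def maximumCoins (heroes : List Int) (monsters : List Int) (coins : List Int) : List Int :=
  let arr := (heroes.zipIdx).foldl (fun acc hi => acc ++ [hi]) []          -- arr.append((hero, i))
  let arrS := PySem.List.sorted2 arr (fun p => p.1) (fun p => p.2)         -- arr.sort()
  let arr2 := (monsters.zip coins).foldl (fun acc mc => acc ++ [mc]) []    -- arr2.append((m, c))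
  let arr2S := PySem.List.sorted2 arr2 (fun p => p.1) (fun p => p.2)       -- arr2.sort()
  let n := heroes.length
  let m := monsters.length
  (arrS.foldl (fun (st : List Int × Nat × Int) hi =>
      let ls := pvWhileA arr2S m hi.1 st.2.1 st.2.2
      (st.1.set hi.2 ls.2, ls.1, ls.2)) (List.replicate n 0, 0, 0)).1

-- ===== PORT B =====
def maximumCoins_alt (heroes : List Int) (monsters : List Int) (coins : List Int) : List Int :=
  let pairs := PySem.List.sorted2 (monsters.zip coins) (fun p => p.1) (fun p => p.2)
  let vals := pairs.map (fun p => p.1)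
  let pref := (pairs.foldl (fun st p => (st.1 ++ [st.2 + p.2], st.2 + p.2)) ([0], 0)).1
  heroes.map (fun h => pref.getD (PySem.List.bisectRight vals h) 0)

-- ===== PRECONDITION & SPEC =====
-- Pre_ excludes exactly the inputs on which A raises IndexError: when coins is shorter than
-- monsters, A's sweep bound `l < m` uses len(monsters) although arr2 = zip(monsters, coins) is
-- shorter, so the sweep reads past arr2 unless some zipped monster value exceeds every hero.
def Pre_maximumCoins (heroes : List Int) (monsters : List Int) (coins : List Int) : Prop :=
  heroes = [] ∨ monsters.length ≤ coins.length ∨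
    ∃ v ∈ monsters.take coins.length, ∀ h ∈ heroes, h < v
instance (heroes : List Int) (monsters : List Int) (coins : List Int) : Decidable (Pre_maximumCoins heroes monsters coins) := by unfold Pre_maximumCoins; infer_instance

def pvWitness_maximumCoins : List Int × List Int × List Int := ([2, 1], [1, 3], [10, 20])

def Spec_maximumCoins (heroes : List Int) (monsters : List Int) (coins : List Int) (out : List Int) : Prop := out = maximumCoins_alt heroes monsters coins
instance (heroes : List Int) (monsters : List Int) (coins : List Int) (out : List Int) : Decidable (Spec_maximumCoins heroes monsters coins out) := by unfold Spec_maximumCoins; infer_instance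

-- ===== CLAIM (what is proved, stated in full; the proofs are below) =====
def Claim_equal_maximumCoins : Prop := ∀ (heroes : List Int) (monsters : List Int) (coins : List Int), Dom_maximumCoins heroes monsters coins → Pre_maximumCoins heroes monsters coins → Spec_maximumCoins heroes monsters coins (maximumCoins heroes monsters coins)

-- ===== LEMMAS AND PROOFS =====

-- the quantities both programs compute about the sorted monster/coin list
def pvCnt (P : List (Int × Int)) (h : Int) : Nat :=
  PySem.List.bisectRight (P.map (fun p => p.1)) h

def pvSumTake (P : List (Int × Int)) (k : Nat) : Int :=
  ((P.take k).map (fun p => p.2)).sum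

-- insertion keeps the list pairwise-ordered by the first key
lemma pv_pairwise_insertBy {α : Type} (before : α → α → Bool) (R : α → α → Prop)
    (hR2 : ∀ a b, before a b = true → R a b) (hR : ∀ a b, before a b = false → R b a)
    (ht : ∀ a b c, R a b → R b c → R a c) (x : α) : ∀ (ys : List α), ys.Pairwise R →
    (PySem.List.insertBy before x ys).Pairwise R := by
  intro ys
  induction ys with
  | nil => intro _; simp [PySem.List.insertBy]
  | cons y ys ih =>
    intro hp
    rw [List.pairwise_cons] at hp
    obtain ⟨hy, hys⟩ := hp
    rw [PySem.List.insertBy]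
    by_cases hb : before x y = true
    · simp only [hb, if_true]
      refine List.Pairwise.cons ?_ (List.Pairwise.cons hy hys)
      intro z hz
      rcases List.mem_cons.mp hz with rfl | hz
      · exact hR2 _ _ hb
      · exact ht _ _ _ (hR2 _ _ hb) (hy z hz)
    · rw [Bool.not_eq_true] at hb
      simp only [hb, Bool.false_eq_true, if_false]
      refine List.Pairwise.cons ?_ (ih hys)
      intro z hz
      rcases (PySem.List.mem_insertBy before x z ys).mp hz with rfl | hz
      · exact hR _ _ hb
      · exact hy z hz

lemma pv_pairwise_sorted2 {α κ₂ : Type} [LinearOrder κ₂] (xs : List α)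
    (k1 : α → Int) (k2 : α → κ₂) :
    (PySem.List.sorted2 xs k1 k2).Pairwise (fun a b => k1 a ≤ k1 b) := by
  show (PySem.List.sorted2 xs k1 k2 false).Pairwise _
  rw [PySem.List.sorted2]
  
  have key : ∀ (acc : List α), acc.Pairwise (fun a b => k1 a ≤ k1 b) →
      (xs.foldl (fun acc x => PySem.List.insertBy
        (fun a b => decide (k1 a < k1 b) || !decide (k1 b < k1 a) && decide (k2 a < k2 b)) x acc) acc).Pairwise
        (fun a b => k1 a ≤ k1 b) := by
    induction xs with
    | nil => intro acc h; exact h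
    | cons x xs ih =>
      intro acc h
      exact ih _ (pv_pairwise_insertBy _ _
        (by intro a b hb; simp at hb; rcases hb with h1 | h1 <;> omega)
        (by intro a b hb; simp at hb; omega)
        (by intro a b c; omega) x acc h)
  exact key [] (List.Pairwise.nil)

lemma pv_cnt_le_length (P : List (Int × Int)) (h : Int)
    (hP : P.Pairwise (fun a b => a.1 ≤ b.1)) : pvCnt P h ≤ P.length := by
  have hs := PySem.List.bisectRight_spec (P.map (fun p => p.1)) h (by
    exact (List.pairwise_map).mpr hP)
  simpa [pvCnt] using hs.1

lemma pv_cnt_lt_iff (P : List (Int × Int)) (h : Int)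
    (hP : P.Pairwise (fun a b => a.1 ≤ b.1)) (j : Nat) (hj : j < P.length) :
    (j < pvCnt P h ↔ (P[j]).1 ≤ h) := by
  unfold pvCnt
  have hs := PySem.List.bisectRight_spec (P.map (fun p => p.1)) h ((List.pairwise_map).mpr hP)
  have hj' : j < (P.map (fun p => p.1)).length := by simpa using hj
  constructor
  · intro hlt
    have := hs.2.1 j hj' hlt
    simpa using this
  · intro hle
    by_contra hge
    have := hs.2.2 j hj' (by omega)
    rw [List.getElem_map] at this
    omega

lemma pv_cnt_mono (P : List (Int × Int)) (hP : P.Pairwise (fun a b => a.1 ≤ b.1))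
    {h h' : Int} (hh : h ≤ h') : pvCnt P h ≤ pvCnt P h' := by
  by_contra hc
  have h1 : pvCnt P h' < pvCnt P h := by omega
  have h2 : pvCnt P h ≤ P.length := pv_cnt_le_length P h hP
  have hj : pvCnt P h' < P.length := by omega
  have hle : (P[pvCnt P h']).1 ≤ h := (pv_cnt_lt_iff P h hP _ hj).mp h1
  have : pvCnt P h' < pvCnt P h' := (pv_cnt_lt_iff P h' hP _ hj).mpr (by omega)
  omega

lemma pv_sumTake_succ (P : List (Int × Int)) (l : Nat) (hl : l < P.length) :
    pvSumTake P (l + 1) = pvSumTake P l + (P[l]).2 := by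
  unfold pvSumTake
  rw [List.map_take, List.map_take, List.sum_take_succ _ l (by simpa using hl)]
  simp

lemma pv_whileA (P : List (Int × Int)) (m : Nat) (hero : Int)
    (hP : P.Pairwise (fun a b => a.1 ≤ b.1)) (hm : P.length ≤ m) :
    ∀ l, l ≤ pvCnt P hero →
      pvWhileA P m hero l (pvSumTake P l) = (pvCnt P hero, pvSumTake P (pvCnt P hero)) := by
  have hkl := pv_cnt_le_length P hero hP
  intro l hl
  generalize hd : pvCnt P hero - l = d
  induction d generalizing l with
  | zero =>
    have hlk : l = pvCnt P hero := by omega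
    rw [← hlk]
    rw [pvWhileA]
    split
    · rcases Nat.lt_or_ge l P.length with hlen | hlen
      · have hnle : ¬ (P[l]).1 ≤ hero := by
          by_contra hc
          have := (pv_cnt_lt_iff P hero hP l hlen).mpr hc
          omega
        simp [List.getElem?_eq_getElem hlen, hnle]
      · rw [List.getElem?_eq_none hlen]
    · rfl
  | succ d ih =>
    have hlt : l < pvCnt P hero := by omega
    have hlen : l < P.length := by omega
    rw [pvWhileA]
    have hlm : l < m := by omega
    have hle : (P[l]).1 ≤ hero := (pv_cnt_lt_iff P hero hP l hlen).mp hlt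
    rw [dif_pos hlm]
    simp only [List.getElem?_eq_getElem hlen, hle, if_true]
    rw [← pv_sumTake_succ P l hlen]
    exact ih (l + 1) (by omega) (by omega)

lemma pv_foldA (P : List (Int × Int)) (m : Nat)
    (hP : P.Pairwise (fun a b => a.1 ≤ b.1)) (hm : P.length ≤ m) :
    ∀ (hs : List (Int × Nat)) (ans : List Int) (l : Nat),
      hs.Pairwise (fun a b => a.1 ≤ b.1) → (∀ p ∈ hs, l ≤ pvCnt P p.1) →
      (hs.foldl (fun (st : List Int × Nat × Int) hi =>
          let ls := pvWhileA P m hi.1 st.2.1 st.2.2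
          (st.1.set hi.2 ls.2, ls.1, ls.2)) (ans, l, pvSumTake P l)).1
      = hs.foldl (fun a hi => a.set hi.2 (pvSumTake P (pvCnt P hi.1))) ans := by
  intro hs
  induction hs with
  | nil => intro ans l _ _; rfl
  | cons hi t ih =>
    intro ans l hpw hinv
    rw [List.pairwise_cons] at hpw
    obtain ⟨hhd, hpt⟩ := hpw
    have hli : l ≤ pvCnt P hi.1 := hinv hi (List.mem_cons_self ..)
    simp only [List.foldl_cons]
    rw [pv_whileA P m hi.1 hP hm l hli]
    exact ih (ans.set hi.2 (pvSumTake P (pvCnt P hi.1))) (pvCnt P hi.1) hpt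
      (fun p hp => pv_cnt_mono P hP (hhd p hp))

lemma pv_scatter (g : Int × Nat → Int) (v : Nat → Int) :
    ∀ (hs : List (Int × Nat)) (ans : List Int), (∀ p ∈ hs, g p = v p.2) →
      (∀ p ∈ hs, p.2 < ans.length) → ∀ (j : Nat),
      (hs.foldl (fun a p => a.set p.2 (g p)) ans)[j]? =
        if ∃ p ∈ hs, p.2 = j then some (v j) else ans[j]? := by
  intro hs
  induction hs with
  | nil => intro ans _ _ j; simp
  | cons q t ih =>
    intro ans hg hb j
    rw [List.foldl_cons]
    rw [ih (ans.set q.2 (g q)) (fun p hp => hg p (List.mem_cons_of_mem _ hp))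
        (fun p hp => by rw [List.length_set]; exact hb p (List.mem_cons_of_mem _ hp)) j]
    by_cases hex : ∃ p ∈ t, p.2 = j
    · rw [if_pos hex, if_pos ⟨hex.choose, List.mem_cons_of_mem _ hex.choose_spec.1, hex.choose_spec.2⟩]
    · rw [if_neg hex]
      by_cases hq : q.2 = j
      · rw [if_pos ⟨q, List.mem_cons_self .., hq⟩]
        rw [← hq, List.getElem?_set_self (hb q (List.mem_cons_self ..))]
        rw [hg q (List.mem_cons_self ..), hq]
      · have hne : ¬ ∃ p ∈ q :: t, p.2 = j := by
          rintro ⟨p, hp, hpj⟩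
          rcases List.mem_cons.mp hp with rfl | hp'
          · exact hq hpj
          · exact hex ⟨p, hp', hpj⟩
        rw [if_neg hne, List.getElem?_set_ne hq]

def pvPsum (s : Int) : List (Int × Int) → List Int
  | [] => []
  | p :: t => (s + p.2) :: pvPsum (s + p.2) t

lemma pv_prefix_eq : ∀ (P : List (Int × Int)) (pr : List Int) (s : Int),
    (P.foldl (fun st p => (st.1 ++ [st.2 + p.2], st.2 + p.2)) (pr, s)).1 = pr ++ pvPsum s P := by
  intro P
  induction P with
  | nil => intro pr s; simp [pvPsum]
  | cons p t ih =>
    intro pr s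
    rw [List.foldl_cons]
    show (t.foldl _ (pr ++ [s + p.2], s + p.2)).1 = _
    rw [ih (pr ++ [s + p.2]) (s + p.2)]
    simp [pvPsum]

lemma pv_psum_getD : ∀ (P : List (Int × Int)) (s : Int) (k : Nat), k ≤ P.length →
    (s :: pvPsum s P).getD k 0 = s + ((P.take k).map (fun p => p.2)).sum := by
  intro P
  induction P with
  | nil =>
    intro s k hk
    have hk0 : k = 0 := by simpa using hk
    subst hk0
    simp [pvPsum]
  | cons p t ih =>
    intro s k hk
    cases k with
    | zero => simp
    | succ k =>
      show (pvPsum s (p :: t)).getD k 0 = _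
      rw [show pvPsum s (p :: t) = (s + p.2) :: pvPsum (s + p.2) t from rfl]
      rw [ih (s + p.2) k (by simpa using hk)]
      simp
      ring

-- the central equality: the two ports agree on ALL inputs
lemma pv_main (heroes monsters coins : List Int) :
    maximumCoins heroes monsters coins = maximumCoins_alt heroes monsters coins := by
  have hP : (PySem.List.sorted2 (monsters.zip coins) (fun p => p.1) (fun p => p.2)).Pairwise
      (fun a b => a.1 ≤ b.1) :=
    pv_pairwise_sorted2 (monsters.zip coins) (fun p => p.1) (fun p => p.2)
  have hperm := PySem.List.sorted2_perm (monsters.zip coins) (fun p => p.1) (fun p => p.2) false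
  have hm : (PySem.List.sorted2 (monsters.zip coins) (fun p => p.1) (fun p => p.2)).length
      ≤ monsters.length := by
    rw [hperm.length_eq, List.length_zip]; omega
  have hHperm := PySem.List.sorted2_perm heroes.zipIdx (fun p => p.1) (fun p => p.2) false
  have hHpw := pv_pairwise_sorted2 heroes.zipIdx (fun p => p.1) (fun p => p.2)
  have hmem : ∀ p ∈ PySem.List.sorted2 heroes.zipIdx (fun p => p.1) (fun p => p.2),
      heroes[p.2]? = some p.1 := by
    intro p hp
    have hz : p ∈ heroes.zipIdx := hHperm.mem_iff.mp hp
    obtain ⟨x, i⟩ := p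
    exact List.mk_mem_zipIdx_iff_getElem?.mp hz
  have hltn : ∀ p ∈ PySem.List.sorted2 heroes.zipIdx (fun p => p.1) (fun p => p.2),
      p.2 < heroes.length := by
    intro p hp
    exact (List.getElem?_eq_some_iff.mp (hmem p hp)).1
  rw [maximumCoins, maximumCoins_alt]
  simp only [PySem.List.foldl_append_singleton, List.nil_append]
  have hfold := pv_foldA (PySem.List.sorted2 (monsters.zip coins) (fun p => p.1) (fun p => p.2))
    monsters.length hP hm (PySem.List.sorted2 heroes.zipIdx (fun p => p.1) (fun p => p.2))
    (List.replicate heroes.length 0) 0 hHpw (fun p _ => Nat.zero_le _)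
  rw [show pvSumTake (PySem.List.sorted2 (monsters.zip coins) (fun p => p.1) (fun p => p.2)) 0
      = 0 from rfl] at hfold
  rw [hfold, pv_prefix_eq, List.singleton_append]
  apply List.ext_getElem?
  intro j
  rw [pv_scatter
    (fun hi => pvSumTake (PySem.List.sorted2 (monsters.zip coins) (fun p => p.1) (fun p => p.2))
      (pvCnt (PySem.List.sorted2 (monsters.zip coins) (fun p => p.1) (fun p => p.2)) hi.1))
    (fun j => pvSumTake (PySem.List.sorted2 (monsters.zip coins) (fun p => p.1) (fun p => p.2))
      (pvCnt (PySem.List.sorted2 (monsters.zip coins) (fun p => p.1) (fun p => p.2))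
        (heroes.getD j 0)))
    (PySem.List.sorted2 heroes.zipIdx (fun p => p.1) (fun p => p.2))
    (List.replicate heroes.length 0)
    (by intro p hp
        simp only [List.getD_eq_getElem?_getD, hmem p hp, Option.getD_some])
    (by intro p hp
        simpa using hltn p hp)
    j]
  rcases Nat.lt_or_ge j heroes.length with hj | hj
  · have hjin : ((heroes[j], j) : Int × Nat) ∈ heroes.zipIdx :=
      List.mk_mem_zipIdx_iff_getElem?.mpr (List.getElem?_eq_getElem hj)
    rw [if_pos ⟨(heroes[j], j), hHperm.mem_iff.mpr hjin, rfl⟩]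
    rw [List.getElem?_map, List.getElem?_eq_getElem hj]
    have hk := pv_cnt_le_length (PySem.List.sorted2 (monsters.zip coins) (fun p => p.1) (fun p => p.2))
      heroes[j] hP
    rw [Option.map_some]
    have hps := pv_psum_getD (PySem.List.sorted2 (monsters.zip coins) (fun p => p.1) (fun p => p.2))
      0 (pvCnt (PySem.List.sorted2 (monsters.zip coins) (fun p => p.1) (fun p => p.2)) heroes[j]) hk
    rw [show PySem.List.bisectRight
        ((PySem.List.sorted2 (monsters.zip coins) (fun p => p.1) (fun p => p.2)).map (fun p => p.1))
        heroes[j]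
      = pvCnt (PySem.List.sorted2 (monsters.zip coins) (fun p => p.1) (fun p => p.2)) heroes[j]
      from rfl, hps]
    simp [pvSumTake, List.getD_eq_getElem?_getD, List.getElem?_eq_getElem hj]
  · have hne : ¬ ∃ p ∈ PySem.List.sorted2 heroes.zipIdx (fun p => p.1) (fun p => p.2), p.2 = j := by
      rintro ⟨p, hp, rfl⟩
      exact absurd (hltn p hp) (by omega)
    rw [if_neg hne]
    rw [List.getElem?_eq_none (by simpa using hj), List.getElem?_eq_none (by simpa using hj)]



-- ===== VERDICT (by name: the statement is the Claim_ definition above) =====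
theorem maximumCoins_spec : Claim_equal_maximumCoins := by
  intro heroes monsters coins _ _
  unfold Spec_maximumCoins
  exact pv_main heroes monsters coins
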